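-- pv_equiv track=rewrite | github.com/rwsargent/adventofcode | day17.py | execute_part_two
-- ===== SOURCE A (Python) =====
-- def execute_part_two(input):
--     ps =  [x for x in powerset(input)]
--     size_map = [0 for x in range(len(input)+1)]
--     for pset in ps:
--         acc = sum(pset)
--         if (acc == 150):
--             size_map[len(pset)] += 1
--     #return the first non-zero number
--     for x in size_map:
--         if x != 0:
--             return x
--
-- def powerset(seq):
--     """
--     Returns all the subsets of this set. This is a generator.
--     """
--     if len(seq) <= 1:
--         yield seq
--         yield []
--     else:
--         for item in powerset(seq[1:]):
--             yield [seq[0]]+item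
--             yield item
-- ===== SOURCE B (Python) =====
-- def execute_part_two(input):
--     # DP: dp[(s, k)] = number of subsets of the items seen so far with sum s and size k.
--     n = len(input)
--     dp = {(0, 0): 1}
--     for x in input:
--         ndp = dict(dp)
--         for (s, k), c in dp.items():
--             key = (s + x, k + 1)
--             ndp[key] = ndp.get(key, 0) + c
--         dp = ndp
--     for k in range(n + 1):
--         c = dp.get((150, k), 0)
--         if c != 0:
--             return c
-- ===== Notes on version B (the rewrite author's own statement) =====
-- stated objective: alternative
-- what changed: Replaces A's recursive enumeration of all 2^n subsets with a dynamic program over a dict counting subsets by (sum, size), then reads off the first size with a nonzero count at sum 150.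
import Mathlib
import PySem

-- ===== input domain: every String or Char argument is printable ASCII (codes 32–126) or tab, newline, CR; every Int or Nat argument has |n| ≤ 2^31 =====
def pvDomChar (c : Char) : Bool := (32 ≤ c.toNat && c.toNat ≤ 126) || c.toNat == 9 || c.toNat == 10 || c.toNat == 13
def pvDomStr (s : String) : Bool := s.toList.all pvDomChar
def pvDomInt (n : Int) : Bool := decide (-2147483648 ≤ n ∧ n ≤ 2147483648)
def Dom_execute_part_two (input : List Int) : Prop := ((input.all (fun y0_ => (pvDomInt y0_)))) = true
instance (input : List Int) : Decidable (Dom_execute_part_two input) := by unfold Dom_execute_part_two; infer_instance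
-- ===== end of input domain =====

-- B replaces A's exponential powerset enumeration by a dynamic program counting subsets by (sum, size).

-- ===== PORT A =====
-- powerset(seq): generator; base case len(seq) <= 1 yields seq then []
def powersetA : List Int → List (List Int)
  | [] => [[], []]
  | [x] => [[x], []]
  | x :: y :: rest =>
      (powersetA (y :: rest)).flatMap (fun item => [x :: item, item])

-- for x in size_map: if x != 0: return x
def firstNonzeroA : List Int → Option Int
  | [] => none
  | x :: rest => if x ≠ 0 then some x else firstNonzeroA rest

def execute_part_two (input : List Int) : Option Int :=
  let ps := powersetA input
  let size_map : List Int :=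
    (PySem.List.pyRange 0 (PySem.List.len input + 1) 1).map (fun _ => (0 : Int))
  let size_map := ps.foldl
    (fun sm pset =>
      if pset.sum = 150 then
        PySem.List.pySetD sm (pset.length : Int)
          (PySem.List.pyGetD sm (pset.length : Int) 0 + 1)
      else sm) size_map
  firstNonzeroA size_map

-- ===== PORT B =====
-- one DP step: ndp = dict(dp); for (s,k),c in dp.items(): ndp[(s+x,k+1)] = ndp.get((s+x,k+1),0) + c
def bStep (x : Int) (dp : PySem.Dict (Int × Int) Int) : PySem.Dict (Int × Int) Int :=
  dp.items.foldl
    (fun nd p =>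
      nd.insert (p.1.1 + x, p.1.2 + 1) (nd.getD (p.1.1 + x, p.1.2 + 1) 0 + p.2))
    dp

-- for k in range(n+1): c = dp.get((150,k),0); if c != 0: return c
def bFind (dp : PySem.Dict (Int × Int) Int) : List Int → Option Int
  | [] => none
  | k :: rest =>
      let c := dp.getD (150, k) 0
      if c ≠ 0 then some c else bFind dp rest

def execute_part_two_alt (input : List Int) : Option Int :=
  let n := PySem.List.len input
  let dp := input.foldl (fun dp x => bStep x dp)
      ((PySem.Dict.empty : PySem.Dict (Int × Int) Int).insert (0, 0) 1)
  bFind dp (PySem.List.pyRange 0 (n + 1) 1)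

-- ===== PRECONDITION & SPEC =====
def Spec_execute_part_two (input : List Int) (out : Option Int) : Prop := out = execute_part_two_alt input
instance (input : List Int) (out : Option Int) : Decidable (Spec_execute_part_two input out) := by unfold Spec_execute_part_two; infer_instance

-- ===== CLAIM (what is proved, stated in full; the proofs are below) =====
def Claim_equal_execute_part_two : Prop := ∀ (input : List Int), Dom_execute_part_two input → Spec_execute_part_two input (execute_part_two input)

-- ===== LEMMAS AND PROOFS =====

-- N xs s k = number of sublists of xs with sum s and length k (0 for k < 0)
def N : List Int → Int → Int → Int
  | [], s, k => if s = 0 ∧ k = 0 then 1 else 0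
  | x :: xs, s, k => N xs s k + N xs (s - x) (k - 1)

theorem N_append (xs : List Int) (x : Int) : ∀ s k : Int,
    N (xs ++ [x]) s k = N xs s k + N xs (s - x) (k - 1) := by
  induction xs with
  | nil => intro s k; simp [N]
  | cons y ys ih =>
      intro s k
      simp only [List.cons_append, N, ih]
      have : s - y - x = s - x - y := by ring
      rw [this]
      ring

-- count of matching subsets in a list of subsets
def cnt (ps : List (List Int)) (s k : Int) : Int :=
  (ps.countP (fun p => p.sum == s && (p.length : Int) == k) : Int)

theorem cnt_flatMap (l : List (List Int)) (x s k : Int) :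
    cnt (l.flatMap (fun item => [x :: item, item])) s k
      = cnt l (s - x) (k - 1) + cnt l s k := by
  induction l with
  | nil => simp [cnt]
  | cons p l ih =>
      simp only [List.flatMap_cons, cnt, List.countP_append, List.countP_cons,
        List.countP_nil] at *
      push_cast at *
      have hx : ((x :: p).sum == s && ((x :: p).length : Int) == k)
          = (p.sum == s - x && (p.length : Int) == k - 1) := by
        apply Bool.eq_iff_iff.mpr
        simp only [Bool.and_eq_true, beq_iff_eq, List.sum_cons, List.length_cons]
        push_cast
        constructor <;> (rintro ⟨h1, h2⟩; constructor <;> omega)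
      rw [hx, ih]
      ring

theorem cnt_powersetA : ∀ xs : List Int, xs ≠ [] → ∀ s k : Int,
    cnt (powersetA xs) s k = N xs s k := by
  intro xs
  induction xs with
  | nil => intro h; exact absurd rfl h
  | cons x rest ih =>
      intro _ s k
      cases rest with
      | nil =>
          simp only [powersetA, cnt, N, List.countP_cons, List.countP_nil,
            List.sum_cons, List.sum_nil, List.length_cons, List.length_nil]
          simp only [Bool.and_eq_true, beq_iff_eq]
          push_cast
          split_ifs <;> omega
      | cons y rest' =>
          have h : powersetA (x :: y :: rest')
              = (powersetA (y :: rest')).flatMap (fun item => [x :: item, item]) := rfl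
          rw [h, cnt_flatMap, ih (by simp) (s - x) (k - 1), ih (by simp) s k]
          conv_rhs => rw [N]
          ring

-- getD after List.set at an in-range index
theorem getD_set_ite (l : List Int) (j k : Nat) (v : Int) (h : j < l.length) :
    (l.set j v).getD k 0 = if k = j then v else l.getD k 0 := by
  by_cases hk : k = j
  · subst hk; simp [List.getD_eq_getElem?_getD, List.getElem?_set_self h]
  · simp [hk, List.getD_eq_getElem?_getD, List.getElem?_set_ne (Ne.symm hk)]

-- every subset produced by powersetA is no longer than the input
theorem length_le_of_mem_powersetA : ∀ (xs : List Int), ∀ p ∈ powersetA xs,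
    p.length ≤ xs.length := by
  intro xs
  induction xs with
  | nil => intro p hp; simp only [powersetA, List.mem_cons] at hp
           rcases hp with h | h | h <;> simp_all
  | cons x rest ih =>
      cases rest with
      | nil =>
          intro p hp
          simp only [powersetA, List.mem_cons] at hp
          rcases hp with h | h | h <;> simp_all
      | cons y rest' =>
          intro p hp
          have h : powersetA (x :: y :: rest')
              = (powersetA (y :: rest')).flatMap (fun item => [x :: item, item]) := rfl
          rw [h, List.mem_flatMap] at hp
          obtain ⟨item, hitem, hp⟩ := hp
          have := ih item hitem
          simp only [List.mem_cons] at hp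
          rcases hp with h | h | h
          · subst h; simp only [List.length_cons] at this ⊢; omega
          · subst h; simp only [List.length_cons] at this ⊢; omega
          · simp at h

-- the size_map accumulation loop, characterised pointwise
theorem smFold_getD : ∀ (ps : List (List Int)) (L : List Int),
    (∀ p ∈ ps, p.length < L.length) → ∀ k : Nat,
    (ps.foldl
      (fun sm pset =>
        if pset.sum = 150 then
          PySem.List.pySetD sm (pset.length : Int)
            (PySem.List.pyGetD sm (pset.length : Int) 0 + 1)
        else sm) L).getD k 0
      = L.getD k 0 + (ps.countP (fun p => p.sum == 150 && p.length == k) : Int) := by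
  intro ps
  induction ps with
  | nil => intro L _ k; simp
  | cons p ps ih =>
      intro L hlen k
      simp only [List.foldl_cons]
      by_cases hp : p.sum = 150
      · have hplen : p.length < L.length := hlen p (by simp)
        rw [if_pos hp]
        rw [show PySem.List.pySetD L (p.length : Int)
              (PySem.List.pyGetD L (p.length : Int) 0 + 1)
            = L.set p.length (L.getD p.length 0 + 1) by
          simp [PySem.List.pySetD_natCast, PySem.List.pyGetD_natCast]]
        rw [ih _ (by intro q hq; rw [List.length_set]; exact hlen q (by simp [hq]))]
        rw [getD_set_ite L p.length k _ hplen]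
        simp only [List.countP_cons]
        by_cases hk : k = p.length
        · subst hk
          simp [hp]
          ring
        · have : (p.length == k) = false := by
            simp at *
            omega
          simp [hk, this]
      · rw [if_neg hp, ih _ (by intro q hq; exact hlen q (by simp [hq]))]
        simp only [List.countP_cons]
        have : (p.sum == 150 && p.length == k) = false := by
          simp [hp]
        simp [this]

-- length of the size_map is preserved by the loop
theorem smFold_length : ∀ (ps : List (List Int)) (L : List Int),
    (ps.foldl
      (fun sm pset =>
        if pset.sum = 150 then
          PySem.List.pySetD sm (pset.length : Int)
            (PySem.List.pyGetD sm (pset.length : Int) 0 + 1)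
        else sm) L).length = L.length := by
  intro ps
  induction ps with
  | nil => intro L; simp
  | cons p ps ih =>
      intro L
      simp only [List.foldl_cons]
      rw [ih]
      split_ifs <;> simp [PySem.List.pySetD_natCast]

-- sum of the values of the entries with a given key, for a nodup-key item list
theorem sumFilter_getD (key : Int × Int) : ∀ (l : List ((Int × Int) × Int)),
    (l.map (·.1)).Nodup →
    ((l.filter (fun p => p.1 == key)).map (·.2)).sum = (PySem.Dict.mk l).getD key 0 := by
  intro l
  induction l with
  | nil => intro _; simp only [List.filter_nil, List.map_nil, List.sum_nil]; rfl
  | cons e l ih =>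
      intro hnd
      simp only [List.map_cons, List.nodup_cons] at hnd
      rw [PySem.Dict.getD_eq_get?_getD, PySem.Dict.get?_mk_cons]
      by_cases he : e.1 = key
      · have hfilter : l.filter (fun p => p.1 == key) = [] := by
          apply List.filter_eq_nil_iff.mpr
          intro q hq
          simp only [beq_iff_eq]
          intro hcon
          apply hnd.1
          rw [he, ← hcon]
          exact List.mem_map_of_mem hq
        simp [he, hfilter]
      · have : (e.1 == key) = false := by simp [he]
        rw [List.filter_cons, this]
        simp only [Bool.false_eq_true, if_false]
        rw [ih hnd.2, PySem.Dict.getD_eq_get?_getD]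

-- the inner dict loop: each existing entry (s,k,c) adds c at key (s+x,k+1)
theorem foldShift (x : Int) (q : Int × Int) : ∀ (l : List ((Int × Int) × Int))
    (d : PySem.Dict (Int × Int) Int),
    (l.map (fun p => (p.1.1 + x, p.1.2 + 1))).Nodup →
    (l.foldl
      (fun nd p =>
        nd.insert (p.1.1 + x, p.1.2 + 1) (nd.getD (p.1.1 + x, p.1.2 + 1) 0 + p.2)) d).getD q 0
      = d.getD q 0
        + ((l.filter (fun p => ((p.1.1 + x, p.1.2 + 1) : Int × Int) == q)).map (·.2)).sum := by
  intro l
  induction l with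
  | nil => intro d _; simp
  | cons e l ih =>
      intro d hnd
      simp only [List.map_cons, List.nodup_cons] at hnd
      simp only [List.foldl_cons]
      rw [ih _ hnd.2]
      rw [PySem.Dict.getD_insert]
      by_cases hq : q = (e.1.1 + x, e.1.2 + 1)
      · have hfilter : l.filter (fun p => ((p.1.1 + x, p.1.2 + 1) : Int × Int) == q) = [] := by
          apply List.filter_eq_nil_iff.mpr
          intro p hp
          simp only [beq_iff_eq]
          intro hcon
          exact hnd.1 (by rw [hq] at hcon; rw [← hcon]; exact List.mem_map_of_mem hp)
        have : ((e.1.1 + x, e.1.2 + 1) : Int × Int) == q := by simp [hq]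
        rw [List.filter_cons, this, hfilter]
        simp [hq]
      · have : (((e.1.1 + x, e.1.2 + 1) : Int × Int) == q) = false := by
          simp only [beq_eq_false_iff_ne, ne_eq]
          intro hcon
          exact hq hcon.symm
        rw [List.filter_cons, this]
        simp [hq]

-- bStep computes the (s,k) ↦ (s,k) + (s-x,k-1) recurrence on every key
theorem getD_bStep (x : Int) (dp : PySem.Dict (Int × Int) Int)
    (h : dp.keys.Nodup) (q : Int × Int) :
    (bStep x dp).getD q 0 = dp.getD q 0 + dp.getD (q.1 - x, q.2 - 1) 0 := by
  obtain ⟨items⟩ := dp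
  simp only [PySem.Dict.keys] at h
  have hnd : (items.map (fun p => ((p.1.1 + x, p.1.2 + 1) : Int × Int))).Nodup := by
    have : (fun (p : (Int × Int) × Int) => ((p.1.1 + x, p.1.2 + 1) : Int × Int))
        = (fun (s : Int × Int) => ((s.1 + x, s.2 + 1) : Int × Int)) ∘ (·.1) := rfl
    rw [this, ← List.map_map]
    apply h.map
    intro a b hab
    simp only [Prod.mk.injEq] at hab
    exact Prod.ext (by omega) (by omega)
  have hstep : bStep x ⟨items⟩
      = items.foldl
          (fun nd p =>
            nd.insert (p.1.1 + x, p.1.2 + 1) (nd.getD (p.1.1 + x, p.1.2 + 1) 0 + p.2))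
          ⟨items⟩ := rfl
  rw [hstep, foldShift x q items ⟨items⟩ hnd]
  congr 1
  rw [← sumFilter_getD (q.1 - x, q.2 - 1) items h]
  congr 1
  congr 1
  apply List.filter_congr
  intro p _
  apply Bool.eq_iff_iff.mpr
  simp only [beq_iff_eq, Prod.ext_iff]
  constructor <;> (rintro ⟨h1, h2⟩; exact ⟨by omega, by omega⟩)

-- invariant of the outer DP loop
def dpInv (ys : List Int) (dp : PySem.Dict (Int × Int) Int) : Prop :=
  dp.keys.Nodup ∧ ∀ q : Int × Int, dp.getD q 0 = N ys q.1 q.2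

theorem dpInv_init :
    dpInv [] ((PySem.Dict.empty : PySem.Dict (Int × Int) Int).insert (0, 0) 1) := by
  constructor
  · decide
  · intro q
    rw [PySem.Dict.getD_insert]
    by_cases hq : q = (0, 0)
    · simp [hq, N]
    · have : ¬ (q.1 = 0 ∧ q.2 = 0) := by
        intro h; exact hq (Prod.ext h.1 h.2)
      simp [hq, N, this, PySem.Dict.getD_empty]

theorem dpInv_step (ys : List Int) (x : Int) (dp : PySem.Dict (Int × Int) Int)
    (h : dpInv ys dp) : dpInv (ys ++ [x]) (bStep x dp) := by
  constructor
  · exact PySem.Dict.nodup_keys_foldl_insert_key dp.items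
      (fun p => ((p.1.1 + x, p.1.2 + 1) : Int × Int))
      (fun nd p => nd.getD (p.1.1 + x, p.1.2 + 1) 0 + p.2) dp h.1
  · intro q
    rw [getD_bStep x dp h.1 q, h.2 q, h.2 (q.1 - x, q.2 - 1), N_append]

theorem dpInv_foldl : ∀ (l : List Int) (ys : List Int) (dp : PySem.Dict (Int × Int) Int),
    dpInv ys dp → dpInv (ys ++ l) (l.foldl (fun dp x => bStep x dp) dp) := by
  intro l
  induction l with
  | nil => intro ys dp h; simpa using h
  | cons x l ih =>
      intro ys dp h
      have := ih (ys ++ [x]) (bStep x dp) (dpInv_step ys x dp h)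
      simpa [List.append_assoc] using this

-- bFind is firstNonzeroA over the looked-up values
theorem bFind_eq (dp : PySem.Dict (Int × Int) Int) : ∀ ks : List Int,
    bFind dp ks = firstNonzeroA (ks.map (fun k => dp.getD (150, k) 0)) := by
  intro ks
  induction ks with
  | nil => rfl
  | cons k ks ih => simp only [bFind, firstNonzeroA, List.map_cons, ih]

-- the initial size_map is all zeros
theorem getD_map_const_zero (l : List Int) (k : Nat) :
    (l.map (fun _ => (0 : Int))).getD k 0 = 0 := by
  rw [List.getD_eq_getElem?_getD, List.getElem?_map]
  cases l[k]? <;> simp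

-- countP over Nat length equals the Int-cast predicate used by cnt
theorem countP_cast (ps : List (List Int)) (i : Nat) :
    (ps.countP (fun p => p.sum == 150 && p.length == i) : Int)
      = cnt ps 150 (i : Int) := by
  unfold cnt
  congr 1
  apply List.countP_congr
  intro p _
  simp only [Bool.and_eq_true, beq_iff_eq, Nat.cast_inj]

-- ===== VERDICT (by name: the statement is the Claim_ definition above) =====
theorem execute_part_two_spec : Claim_equal_execute_part_two := by
  intro input _
  unfold Spec_execute_part_two
  by_cases hne : input = []
  · subst hne; decide
  · have hdp := dpInv_foldl input [] _ dpInv_init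
    simp only [List.nil_append] at hdp
    show execute_part_two input = execute_part_two_alt input
    simp only [execute_part_two, execute_part_two_alt, PySem.List.len_eq]
    rw [bFind_eq]
    congr 1
    have hL0len : ((PySem.List.pyRange 0 ((input.length : Int) + 1) 1).map
        (fun _ => (0 : Int))).length = input.length + 1 := by
      rw [List.length_map, PySem.List.length_pyRange_one]
      omega
    apply List.ext_getElem
    · rw [smFold_length, hL0len, List.length_map, PySem.List.length_pyRange_one]
      omega
    · intro i h1 h2
      have hi : i < input.length + 1 := by
        rw [smFold_length, hL0len] at h1; exact h1
      rw [← List.getD_eq_getElem _ 0 h1]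
      rw [smFold_getD _ _ (by
        intro p hp
        rw [hL0len]
        have := length_le_of_mem_powersetA input p hp
        omega) i]
      rw [getD_map_const_zero, countP_cast,
        cnt_powersetA input hne 150 (i : Int)]
      rw [List.getElem_map, PySem.List.getElem_pyRange_one]
      rw [hdp.2 (150, 0 + (i : Int))]
      norm_num
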